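-- pv_equiv track=rewrite | github.com/X1-Il/ecpge | src/pages/Cours/Sup/Info/src/Pdfs/ict/8-7 - TD - Scm et Alpha-tri.py | scm
-- ===== SOURCE A (Python) =====
-- def scm(s):
--     L_scm = []
--     Taille = len(s)
--     Ind_1 = 0
--     for i in range(Taille-1):
--         if s[i] > s[i+1]:
--             Ind_2 = i
--             L_scm.append([Ind_1,Ind_2])
--             Ind_1 = Ind_2 + 1
--     L_scm.append([Ind_1,Taille-1])
--     return L_scm
-- ===== SOURCE B (Python) =====
-- def scm(s):
--     """Divide and conquer: split the list in half, segment each half into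
--     maximal non-descending runs, then merge, fusing the run that straddles
--     the midpoint when the boundary pair is non-descending."""
--     n = len(s)
--     if n == 0:
--         return [[0, n - 1]]
--
--     def solve(lo, hi):
--         if hi - lo == 1:
--             return [[lo, lo]]
--         mid = (lo + hi) // 2
--         L = solve(lo, mid)
--         R = solve(mid, hi)
--         if s[mid - 1] <= s[mid]:
--             return L[:-1] + [[L[-1][0], R[0][1]]] + R[1:]
--         return L + R
--
--     return solve(0, n)
-- ===== Notes on version B (the rewrite author's own statement) =====
-- stated objective: alternative
-- what changed: B computes the run intervals by divide and conquer: it splits the index range in half, segments each half recursively, and merges the two interval lists, fusing the interval that straddles the midpoint when the boundary pair is non-descending, instead of A's single left-to-right loop collecting descent boundaries into an accumulator.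
import Mathlib
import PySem

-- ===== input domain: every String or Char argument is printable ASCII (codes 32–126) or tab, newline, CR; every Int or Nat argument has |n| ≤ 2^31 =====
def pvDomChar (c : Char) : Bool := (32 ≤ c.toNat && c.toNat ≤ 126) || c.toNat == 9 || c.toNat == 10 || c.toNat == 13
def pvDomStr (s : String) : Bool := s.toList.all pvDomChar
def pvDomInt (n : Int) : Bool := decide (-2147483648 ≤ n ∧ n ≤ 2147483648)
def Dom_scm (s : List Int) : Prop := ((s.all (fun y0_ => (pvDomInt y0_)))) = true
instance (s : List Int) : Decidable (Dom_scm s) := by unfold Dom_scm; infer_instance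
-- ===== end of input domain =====

-- B replaces A's single left-to-right boundary scan by divide and conquer: split in half,
-- segment each half, fuse the straddling run at the midpoint; same value, similar cost.

-- ===== PORT A =====
-- literal transliteration of A: one loop over range(len(s)-1), state (L_scm, Ind_1);
-- the indices i, i+1 are always in range, so s[i] is ported as pyGetD (default never used).
def scm (s : List Int) : List (List Int) :=
  let Taille : Int := s.length
  let st : List (List Int) × Int :=
    (PySem.List.pyRange 0 (Taille - 1) 1).foldl
      (fun st i =>
        if PySem.List.pyGetD s i 0 > PySem.List.pyGetD s (i + 1) 0 then
          (st.1 ++ [[st.2, i]], i + 1)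
        else st)
      ([], 0)
  st.1 ++ [[st.2, Taille - 1]]

-- ===== PORT B =====
-- Source B's inner function solve(lo, hi); the fuel argument is only a totality guard
-- (the call below passes fuel = len(s), which the halving recursion never exhausts);
-- L[:-1], L[-1], R[0], R[1:] are ported with PySem slices/pyGetD (indices always valid).
def scmSolve (s : List Int) : Nat → Int → Int → List (List Int)
  | 0, _, _ => []
  | fuel + 1, lo, hi =>
    if hi - lo = 1 then [[lo, lo]]
    else
      let mid := PySem.Int.floordiv (lo + hi) 2
      let L := scmSolve s fuel lo mid
      let R := scmSolve s fuel mid hi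
      if PySem.List.pyGetD s (mid - 1) 0 ≤ PySem.List.pyGetD s mid 0 then
        PySem.List.slice L none (some (-1)) ++
          [[PySem.List.pyGetD (PySem.List.pyGetD L (-1) []) 0 0,
            PySem.List.pyGetD (PySem.List.pyGetD R 0 []) 1 0]] ++
          PySem.List.slice R (some 1) none
      else L ++ R

def scm_alt (s : List Int) : List (List Int) :=
  let n : Int := s.length
  if n = 0 then [[0, n - 1]]
  else scmSolve s s.length 0 n

-- ===== PRECONDITION & SPEC =====
def Spec_scm (s : List Int) (out : List (List Int)) : Prop := out = scm_alt s
instance (s : List Int) (out : List (List Int)) : Decidable (Spec_scm s out) := by unfold Spec_scm; infer_instance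

-- ===== CLAIM (what is proved, stated in full; the proofs are below) =====
def Claim_equal_scm : Prop := ∀ (s : List Int), Dom_scm s → Spec_scm s (scm s)

-- ===== LEMMAS AND PROOFS =====

-- length of the maximal non-descending prefix (proof-only characterisation)
def scmRunLen (t : List Int) : Nat :=
  match t with
  | a :: b :: r => if a ≤ b then 1 + scmRunLen (b :: r) else 1
  | _ => 1

theorem scmRunLen_cons2 (a b : Int) (r : List Int) :
    scmRunLen (a :: b :: r) = if a ≤ b then 1 + scmRunLen (b :: r) else 1 := rfl

theorem scmRunLen_pos (t : List Int) : 1 ≤ scmRunLen t := by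
  match t with
  | [] => simp [scmRunLen]
  | [a] => simp [scmRunLen]
  | a :: b :: r => rw [scmRunLen_cons2]; split_ifs <;> omega

theorem scmRunLen_le_length (t : List Int) (h : t ≠ []) : scmRunLen t ≤ t.length := by
  induction t with
  | nil => exact absurd rfl h
  | cons a r ih =>
    cases r with
    | nil => simp [scmRunLen]
    | cons b r2 =>
      rw [scmRunLen_cons2]
      split_ifs with hab
      · have := ih (by simp)
        simp at this ⊢; omega
      · simp

-- canonical run-peeling segmentation (proof-only intermediate between A and B)
def scmGo (t : List Int) (off : Int) : List (List Int) :=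
  if t.length ≤ scmRunLen t then [[off, off + t.length - 1]]
  else [[off, off + scmRunLen t - 1]] ++ scmGo (t.drop (scmRunLen t)) (off + scmRunLen t)
termination_by t.length
decreasing_by
  have := scmRunLen_pos t
  simp [List.length_drop]; omega

-- A's loop, rebased to Nat indices and generalized over an index offset (proof-only helper)
def scmFoldA (t : List Int) (off : Int) : List (List Int) :=
  let st : List (List Int) × Int :=
    (List.range (t.length - 1)).foldl
      (fun st k =>
        if t.getD k 0 > t.getD (k + 1) 0 then
          (st.1 ++ [[st.2, off + (k : Int)]], off + (k : Int) + 1)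
        else st)
      ([], off)
  st.1 ++ [[st.2, off + (t.length : Int) - 1]]

theorem scm_eq_scmFoldA (s : List Int) : scm s = scmFoldA s 0 := by
  unfold scm scmFoldA
  simp only [PySem.List.pyRange_one, List.foldl_map, zero_add, sub_zero]
  have hfe : (fun (st : List (List Int) × Int) (k : Nat) =>
      if PySem.List.pyGetD s (k : Int) 0 > PySem.List.pyGetD s ((k : Int) + 1) 0 then
        (st.1 ++ [[st.2, (k : Int)]], (k : Int) + 1)
      else st)
      = (fun st k =>
        if s.getD k 0 > s.getD (k + 1) 0 then
          (st.1 ++ [[st.2, (k : Int)]], (k : Int) + 1)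
        else st) := by
    funext st k
    simp only [show ((k : Int) + 1) = (((k + 1 : Nat)) : Int) from by push_cast; ring,
      PySem.List.pyGetD_natCast]
  rw [hfe, show ((s.length : Int) - 1).toNat = s.length - 1 from by omega]

-- non-descending inside the run
theorem scm_asc (t : List Int) (k : Nat) (h : k + 1 < scmRunLen t) :
    t.getD k 0 ≤ t.getD (k + 1) 0 := by
  induction t generalizing k with
  | nil => simp [scmRunLen] at h
  | cons a r ih =>
    match r, k with
    | [], _ => simp [scmRunLen] at h
    | b :: r', 0 =>
      by_cases hab : a ≤ b
      · simpa [List.getD] using hab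
      · rw [scmRunLen_cons2, if_neg hab] at h; omega
    | b :: r', k' + 1 =>
      by_cases hab : a ≤ b
      · rw [scmRunLen_cons2, if_pos hab] at h
        have := ih (k := k') (by omega)
        simpa [List.getD] using this
      · rw [scmRunLen_cons2, if_neg hab] at h; omega

-- strict descent at the end of the run
theorem scm_break (t : List Int) (h : scmRunLen t < t.length) :
    t.getD (scmRunLen t - 1) 0 > t.getD (scmRunLen t) 0 := by
  induction t with
  | nil => simp [scmRunLen] at h
  | cons a r ih =>
    match r with
    | [] => simp [scmRunLen] at h
    | b :: r' =>
      by_cases hab : a ≤ b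
      · have hL : scmRunLen (a :: b :: r') = 1 + scmRunLen (b :: r') := by
          rw [scmRunLen_cons2, if_pos hab]
        rw [hL] at h ⊢
        have hlt : scmRunLen (b :: r') < (b :: r').length := by
          simp at h ⊢; omega
        have hres := ih hlt
        have hp := scmRunLen_pos (b :: r')
        have e1 : 1 + scmRunLen (b :: r') - 1 = scmRunLen (b :: r') := by omega
        rw [e1]
        have e2 : (a :: b :: r').getD (1 + scmRunLen (b :: r')) 0
            = (b :: r').getD (scmRunLen (b :: r')) 0 := by
          rw [show 1 + scmRunLen (b :: r') = scmRunLen (b :: r') + 1 from by omega]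
          simp [List.getD]
        have e3 : (a :: b :: r').getD (scmRunLen (b :: r')) 0
            = (b :: r').getD (scmRunLen (b :: r') - 1) 0 := by
          conv_lhs => rw [show scmRunLen (b :: r') = (scmRunLen (b :: r') - 1) + 1 from by omega]
          simp [List.getD]
        rw [e2, e3]
        exact hres
      · have hL : scmRunLen (a :: b :: r') = 1 := by
          rw [scmRunLen_cons2, if_neg hab]
        rw [hL]
        simpa [List.getD] using (by omega : b < a)

-- folding a step that never fires leaves the state unchanged
theorem scm_foldl_nofire {β : Type} (p : Nat → Prop) [DecidablePred p]
    (g : β → Nat → β) (l : List Nat) (init : β) (h : ∀ k ∈ l, ¬ p k) :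
    l.foldl (fun st k => if p k then g st k else st) init = init := by
  induction l generalizing init with
  | nil => rfl
  | cons a r ih =>
    simp only [List.foldl_cons, if_neg (h a (by simp))]
    exact ih init (fun k hk => h k (by simp [hk]))

-- the accumulator only grows by appending: pull a prefix out of the fold
theorem scm_foldl_acc (p : Nat → Prop) [DecidablePred p] (u : Int → Nat → List (List Int))
    (v : Nat → Int) (l : List Nat) (acc : List (List Int)) (c : Int) :
    l.foldl (fun st k => if p k then (st.1 ++ u st.2 k, v k) else st) (acc, c)
      = (acc ++ (l.foldl (fun st k => if p k then (st.1 ++ u st.2 k, v k) else st) ([], c)).1,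
         (l.foldl (fun st k => if p k then (st.1 ++ u st.2 k, v k) else st) ([], c)).2) := by
  induction l generalizing acc c with
  | nil => simp
  | cons a r ih =>
    by_cases hp : p a
    · simp only [List.foldl_cons, if_pos hp, List.nil_append]
      rw [ih (acc ++ u c a) (v a), ih (u c a) (v a)]
      simp [List.append_assoc]
    · simp only [List.foldl_cons, if_neg hp]
      exact ih acc c

theorem scm_getD_drop (t : List Int) (j k : Nat) :
    (t.drop j).getD k 0 = t.getD (j + k) 0 := by
  simp [List.getD_eq_getElem?_getD, List.getElem?_drop]

theorem scmFoldA_eq_scmGo (n : Nat) : ∀ (t : List Int), t.length ≤ n → ∀ (off : Int),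
    scmFoldA t off = scmGo t off := by
  induction n with
  | zero =>
    intro t ht off
    have : t = [] := by cases t <;> simp_all
    subst this
    simp [scmFoldA, scmGo, scmRunLen]
  | succ n ih =>
    intro t ht off
    set j := scmRunLen t with hj
    have hjpos : 1 ≤ j := scmRunLen_pos t
    by_cases hcase : t.length ≤ j
    · -- whole list is one run: the descent condition never fires
      have hnof : (List.range (t.length - 1)).foldl
          (fun st k => if t.getD k 0 > t.getD (k + 1) 0 then
            (st.1 ++ [[st.2, off + (k : Int)]], off + (k : Int) + 1) else st)
          ([], off) = ([], off) := by
        apply scm_foldl_nofire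
        intro k hk
        simp only [List.mem_range] at hk
        have hlt : k + 1 < scmRunLen t := by rw [← hj]; omega
        have := scm_asc t k hlt
        omega
      rw [scmGo, ← hj, if_pos hcase]
      unfold scmFoldA
      simp only [hnof]
      rfl
    · -- run of length j < length: split the loop range at the break index j - 1
      rw [not_le] at hcase
      have hbreak : t.getD (j - 1) 0 > t.getD j 0 := by
        rw [hj]; exact scm_break t (by rw [← hj]; exact hcase)
      have hr1 : List.range j = List.range (j - 1) ++ [j - 1] := by
        conv_lhs => rw [show j = (j - 1) + 1 from by omega]
        rw [List.range_succ]
      have hsplitr : List.range (t.length - 1)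
          = (List.range (j - 1) ++ [j - 1]) ++ (List.range (t.length - 1 - j)).map (fun x => j + x) := by
        conv_lhs => rw [show t.length - 1 = j + (t.length - 1 - j) from by omega]
        rw [List.range_add, hr1]
      unfold scmFoldA
      rw [hsplitr, List.foldl_append, List.foldl_append]
      rw [scm_foldl_nofire (p := fun k => t.getD k 0 > t.getD (k + 1) 0)
            (g := fun st k => (st.1 ++ [[st.2, off + (k : Int)]], off + (k : Int) + 1))
            (List.range (j - 1)) ([], off)
            (by
              intro k hk
              simp only [List.mem_range] at hk
              have hlt : k + 1 < scmRunLen t := by rw [← hj]; omega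
              have := scm_asc t k hlt
              omega)]
      simp only [List.foldl_cons, List.foldl_nil]
      rw [if_pos (by rw [show j - 1 + 1 = j from by omega]; exact hbreak)]
      simp only [List.nil_append]
      rw [show off + ((j - 1 : Nat) : Int) + 1 = off + (j : Int) from by omega,
          show off + ((j - 1 : Nat) : Int) = off + (j : Int) - 1 from by omega]
      rw [List.foldl_map]
      -- the remaining fold is the loop of scmFoldA (t.drop j) (off + j)
      have hfe : (fun (st : List (List Int) × Int) (k : Nat) =>
          if t.getD (j + k) 0 > t.getD (j + k + 1) 0 then
            (st.1 ++ [[st.2, off + ((j + k : Nat) : Int)]], off + ((j + k : Nat) : Int) + 1)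
          else st)
          = (fun st k =>
            if (t.drop j).getD k 0 > (t.drop j).getD (k + 1) 0 then
              (st.1 ++ [[st.2, (off + (j : Int)) + (k : Int)]],
               (off + (j : Int)) + (k : Int) + 1)
            else st) := by
        funext st k
        rw [scm_getD_drop, scm_getD_drop, show j + (k + 1) = j + k + 1 from by omega,
          show off + ((j + k : Nat) : Int) = (off + (j : Int)) + (k : Int) from by push_cast; ring]
      rw [hfe, show t.length - 1 - j = (t.drop j).length - 1 from by simp; omega]
      rw [scm_foldl_acc (fun k => (t.drop j).getD k 0 > (t.drop j).getD (k + 1) 0)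
            (fun c k => [[c, (off + (j : Int)) + (k : Int)]])
            (fun k => (off + (j : Int)) + (k : Int) + 1)
            (List.range ((t.drop j).length - 1)) _ _]
      -- assemble via the induction hypothesis on the dropped tail
      have hIH := ih (t.drop j) (by simp; omega) (off + (j : Int))
      rw [scmGo, ← hj, if_neg (by omega)]
      unfold scmFoldA at hIH
      simp only at hIH
      rw [← hIH]
      rw [show off + (j : Int) + ((t.drop j).length : Int) - 1 = off + (t.length : Int) - 1 from by
        simp; omega]
      simp

-- ===== run-length of a concatenation =====

theorem scmRunLen_append_lt (v : List Int) : ∀ (u : List Int),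
    scmRunLen u < u.length → scmRunLen (u ++ v) = scmRunLen u := by
  intro u
  induction u with
  | nil => intro h; simp [scmRunLen] at h
  | cons a r ih =>
    intro h
    cases r with
    | nil => simp [scmRunLen] at h
    | cons b r2 =>
      by_cases hab : a ≤ b
      · rw [scmRunLen_cons2, if_pos hab] at h
        have h2 : scmRunLen (b :: r2) < (b :: r2).length := by
          simp at h ⊢; omega
        have hih := ih h2
        show scmRunLen (a :: b :: (r2 ++ v)) = _
        rw [scmRunLen_cons2, if_pos hab, scmRunLen_cons2, if_pos hab,
          show b :: (r2 ++ v) = (b :: r2) ++ v from rfl, hih]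
      · show scmRunLen (a :: b :: (r2 ++ v)) = _
        rw [scmRunLen_cons2, if_neg hab, scmRunLen_cons2, if_neg hab]

theorem scmRunLen_append_full (v : List Int) (hv : v ≠ []) : ∀ (u : List Int), u ≠ [] →
    scmRunLen u = u.length → u.getD (u.length - 1) 0 ≤ v.getD 0 0 →
    scmRunLen (u ++ v) = u.length + scmRunLen v := by
  intro u
  induction u with
  | nil => intro h; exact absurd rfl h
  | cons a r ih =>
    intro _ hfull hbd
    cases r with
    | nil =>
      cases v with
      | nil => exact absurd rfl hv
      | cons c v' =>
        have hac : a ≤ c := by simpa [List.getD] using hbd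
        show scmRunLen (a :: c :: v') = _
        rw [scmRunLen_cons2, if_pos hac]
        simp
    | cons b r2 =>
      have hab : a ≤ b := by
        by_contra hab
        rw [scmRunLen_cons2, if_neg hab] at hfull
        simp at hfull
      have hfull2 : scmRunLen (b :: r2) = (b :: r2).length := by
        rw [scmRunLen_cons2, if_pos hab] at hfull
        simp at hfull ⊢; omega
      have hbd2 : (b :: r2).getD ((b :: r2).length - 1) 0 ≤ v.getD 0 0 := by
        have e : (a :: b :: r2).length - 1 = ((b :: r2).length - 1) + 1 := by simp
        rw [e] at hbd
        simpa [List.getD] using hbd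
      have hih := ih (by simp) hfull2 hbd2
      show scmRunLen (a :: b :: (r2 ++ v)) = _
      rw [scmRunLen_cons2, if_pos hab,
        show b :: (r2 ++ v) = (b :: r2) ++ v from rfl, hih]
      simp; omega

theorem scmRunLen_append_desc (v : List Int) (hv : v ≠ []) : ∀ (u : List Int), u ≠ [] →
    scmRunLen u = u.length → ¬ (u.getD (u.length - 1) 0 ≤ v.getD 0 0) →
    scmRunLen (u ++ v) = u.length := by
  intro u
  induction u with
  | nil => intro h; exact absurd rfl h
  | cons a r ih =>
    intro _ hfull hbd
    cases r with
    | nil =>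
      cases v with
      | nil => exact absurd rfl hv
      | cons c v' =>
        have hac : ¬ a ≤ c := by simpa [List.getD] using hbd
        show scmRunLen (a :: c :: v') = _
        rw [scmRunLen_cons2, if_neg hac]
        simp
    | cons b r2 =>
      have hab : a ≤ b := by
        by_contra hab
        rw [scmRunLen_cons2, if_neg hab] at hfull
        simp at hfull
      have hfull2 : scmRunLen (b :: r2) = (b :: r2).length := by
        rw [scmRunLen_cons2, if_pos hab] at hfull
        simp at hfull ⊢; omega
      have hbd2 : ¬ ((b :: r2).getD ((b :: r2).length - 1) 0 ≤ v.getD 0 0) := by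
        have e : (a :: b :: r2).length - 1 = ((b :: r2).length - 1) + 1 := by simp
        rw [e] at hbd
        simpa [List.getD] using hbd
      have hih := ih (by simp) hfull2 hbd2
      show scmRunLen (a :: b :: (r2 ++ v)) = _
      rw [scmRunLen_cons2, if_pos hab,
        show b :: (r2 ++ v) = (b :: r2) ++ v from rfl, hih]
      simp only [List.length_cons]
      omega

-- ===== the merge step of B, against the canonical segmentation =====

-- the fusion B performs at the midpoint, in list form
def scmFuse (L R : List (List Int)) : List (List Int) :=
  L.dropLast ++ [[(L.getLastD []).getD 0 0, R.headI.getD 1 0]] ++ R.tail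

theorem scmGo_ne_nil (t : List Int) (off : Int) : scmGo t off ≠ [] := by
  rw [scmGo]; split_ifs <;> simp

theorem scm_getLastD_congr {α : Type} (l : List α) (h : l ≠ []) (d e : α) :
    l.getLastD d = l.getLastD e := by
  rw [List.getLastD_eq_getLast?, List.getLastD_eq_getLast?]
  obtain ⟨x, hx⟩ := Option.isSome_iff_exists.1 (List.getLast?_isSome.2 h)
  rw [hx]
  rfl

theorem scmFuse_cons (iv : List Int) (L R : List (List Int)) (h : L ≠ []) :
    scmFuse (iv :: L) R = iv :: scmFuse L R := by
  unfold scmFuse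
  rw [List.dropLast_cons_of_ne_nil h, List.getLastD_cons, scm_getLastD_congr L h iv []]
  simp

theorem scmGo_append : ∀ (n : Nat) (u : List Int), u.length ≤ n → u ≠ [] →
    ∀ (v : List Int), v ≠ [] → ∀ (off : Int),
    scmGo (u ++ v) off =
      if u.getD (u.length - 1) 0 ≤ v.getD 0 0 then
        scmFuse (scmGo u off) (scmGo v (off + u.length))
      else scmGo u off ++ scmGo v (off + u.length) := by
  intro n
  induction n with
  | zero =>
    intro u hu hne
    exact absurd (by cases u <;> simp_all) hne
  | succ n ih =>
    intro u hulen hu v hv off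
    have hupos : 0 < u.length := List.length_pos_iff.2 hu
    have hvpos : 0 < v.length := List.length_pos_iff.2 hv
    have hjpos : 1 ≤ scmRunLen u := scmRunLen_pos u
    by_cases hcase : scmRunLen u < u.length
    · -- the first run of u ends inside u: peel it on both sides and recurse
      have hA1 : scmRunLen (u ++ v) = scmRunLen u := scmRunLen_append_lt v u hcase
      have hdropne : u.drop (scmRunLen u) ≠ [] :=
        List.ne_nil_of_length_pos (by simp; omega)
      have hLHS : scmGo (u ++ v) off
          = [[off, off + (scmRunLen u : Int) - 1]]
            ++ scmGo (u.drop (scmRunLen u) ++ v) (off + (scmRunLen u : Int)) := by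
        rw [scmGo, if_neg (by simp [hA1]; omega), hA1,
          show (u ++ v).drop (scmRunLen u) = u.drop (scmRunLen u) ++ v from by
            rw [List.drop_append, show scmRunLen u - u.length = 0 from by omega]
            simp]
      have hRHSL : scmGo u off
          = [[off, off + (scmRunLen u : Int) - 1]]
            ++ scmGo (u.drop (scmRunLen u)) (off + (scmRunLen u : Int)) := by
        rw [scmGo, if_neg (by omega)]
      have hIH := ih (u.drop (scmRunLen u)) (by simp; omega) hdropne v hv
        (off + (scmRunLen u : Int))
      -- rebase the boundary condition and offset in the induction hypothesis
      rw [show (u.drop (scmRunLen u)).getD ((u.drop (scmRunLen u)).length - 1) 0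
            = u.getD (u.length - 1) 0 from by
          rw [scm_getD_drop]
          congr 1
          simp; omega,
        show off + (scmRunLen u : Int) + ((u.drop (scmRunLen u)).length : Int)
            = off + (u.length : Int) from by simp; omega] at hIH
      rw [hLHS, hRHSL, hIH]
      by_cases hcond : u.getD (u.length - 1) 0 ≤ v.getD 0 0
      · rw [if_pos hcond, if_pos hcond,
          show ([[off, off + (scmRunLen u : Int) - 1]]
              ++ scmGo (u.drop (scmRunLen u)) (off + (scmRunLen u : Int)))
            = [off, off + (scmRunLen u : Int) - 1]
              :: scmGo (u.drop (scmRunLen u)) (off + (scmRunLen u : Int)) from rfl,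
          scmFuse_cons _ _ _ (scmGo_ne_nil _ _)]
        rfl
      · rw [if_neg hcond, if_neg hcond]
        simp
    · -- u is a single run
      have hju : scmRunLen u = u.length :=
        le_antisymm (scmRunLen_le_length u hu) (by omega)
      have hLu : scmGo u off = [[off, off + (u.length : Int) - 1]] := by
        rw [scmGo, if_pos (by omega)]
      by_cases hcond : u.getD (u.length - 1) 0 ≤ v.getD 0 0
      · rw [if_pos hcond]
        have hA2 : scmRunLen (u ++ v) = u.length + scmRunLen v :=
          scmRunLen_append_full v hv u hu hju hcond
        by_cases hv2 : v.length ≤ scmRunLen v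
        · -- everything fuses into one run
          have hLv : scmGo v (off + (u.length : Int))
              = [[off + (u.length : Int), off + (u.length : Int) + (v.length : Int) - 1]] := by
            rw [scmGo, if_pos hv2]
          have hLuv : scmGo (u ++ v) off = [[off, off + ((u ++ v).length : Int) - 1]] := by
            rw [scmGo, if_pos (by simp [hA2]; omega)]
          rw [hLuv, hLu, hLv]
          simp [scmFuse]
          ring
        · -- v's first run ends inside v
          rw [not_le] at hv2
          have hLv : scmGo v (off + (u.length : Int))
              = [[off + (u.length : Int), off + (u.length : Int) + (scmRunLen v : Int) - 1]]
                ++ scmGo (v.drop (scmRunLen v)) (off + (u.length : Int) + (scmRunLen v : Int)) := by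
            rw [scmGo, if_neg (by omega)]
          have hLuv : scmGo (u ++ v) off
              = [[off, off + ((u.length + scmRunLen v : Nat) : Int) - 1]]
                ++ scmGo (v.drop (scmRunLen v)) (off + ((u.length + scmRunLen v : Nat) : Int)) := by
            rw [scmGo, if_neg (by simp [hA2]; omega), hA2,
              show (u ++ v).drop (u.length + scmRunLen v) = v.drop (scmRunLen v) from by
                rw [List.drop_append, List.drop_eq_nil_of_le (by omega),
                  show u.length + scmRunLen v - u.length = scmRunLen v from by omega]
                simp]
          rw [hLuv, hLu, hLv]
          simp [scmFuse]
          constructor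
          · ring
          · congr 1
            ring
      · rw [if_neg hcond]
        have hA3 : scmRunLen (u ++ v) = u.length :=
          scmRunLen_append_desc v hv u hu hju hcond
        have hLuv : scmGo (u ++ v) off
            = [[off, off + (u.length : Int) - 1]] ++ scmGo v (off + (u.length : Int)) := by
          rw [scmGo, if_neg (by simp [hA3]; omega), hA3,
            show (u ++ v).drop u.length = v from by
              rw [List.drop_append, List.drop_length]
              simp]
        rw [hLuv, hLu]

-- ===== B's divide and conquer against the canonical segmentation =====

theorem scm_getD_take (l : List Int) (i n : Nat) (d : Int) (h : i < n) :
    (l.take n).getD i d = l.getD i d := by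
  simp [List.getD_eq_getElem?_getD, List.getElem?_take_of_lt h]

theorem scm_pyGetD_neg_one (l : List (List Int)) (h : l ≠ []) :
    PySem.List.pyGetD l (-1) [] = l.getLastD [] := by
  have hl : 1 ≤ l.length := by cases l <;> simp_all
  simp [PySem.List.pyGetD, PySem.List.pyGet?, PySem.List.pyIdx?, hl,
    List.getLastD_eq_getLast?, List.getLast?_eq_getElem?]

theorem scm_pyGetD_zero (l : List (List Int)) (h : l ≠ []) :
    PySem.List.pyGetD l 0 [] = l.headI := by
  have hl : 0 < l.length := by cases l <;> simp_all
  simp [PySem.List.pyGetD, PySem.List.pyGet?, PySem.List.pyIdx?, hl]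
  cases l <;> simp_all

theorem scmSolve_eq (s : List Int) : ∀ (fuel : Nat) (lo hi : Nat), lo < hi → hi ≤ s.length →
    hi - lo ≤ fuel →
    scmSolve s fuel (lo : Int) (hi : Int) = scmGo ((s.drop lo).take (hi - lo)) (lo : Int) := by
  intro fuel
  induction fuel with
  | zero => intro lo hi h1 h2 h3; omega
  | succ n ih =>
    intro lo hi h1 h2 h3
    by_cases hbase : hi - lo = 1
    · have hb : ((hi : Int) - lo = 1) := by omega
      have hslice : (s.drop lo).take (hi - lo) = [s.getD lo 0] := by
        rw [hbase]
        cases hd : s.drop lo with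
        | nil =>
          exfalso
          have := congrArg List.length hd
          simp at this; omega
        | cons x xs =>
          have hx : s.getD lo 0 = x := by
            have h0 := scm_getD_drop s lo 0
            rw [hd] at h0
            simpa [List.getD] using h0.symm
          rw [hx]
          simp
      rw [show scmSolve s (n + 1) (lo : Int) (hi : Int)
            = if (hi : Int) - lo = 1 then [[(lo : Int), (lo : Int)]] else _ from rfl,
        if_pos hb, hslice, scmGo]
      norm_num [scmRunLen]
    · have hge2 : lo + 2 ≤ hi := by omega
      have hmid : PySem.Int.floordiv ((lo : Int) + hi) 2 = (((lo + hi) / 2 : Nat) : Int) := by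
        rw [show ((lo : Int) + hi) = (((lo + hi : Nat)) : Int) from by push_cast; ring]
        exact_mod_cast PySem.Int.floordiv_natCast (lo + hi) 2
      set m : Nat := (lo + hi) / 2 with hm
      have hlom : lo < m := by omega
      have hmhi : m < hi := by omega
      -- unfold one step of the recursion
      have hunfold : scmSolve s (n + 1) (lo : Int) (hi : Int)
          = if PySem.List.pyGetD s ((m : Int) - 1) 0 ≤ PySem.List.pyGetD s (m : Int) 0 then
              PySem.List.slice (scmSolve s n (lo : Int) (m : Int)) none (some (-1)) ++
                [[PySem.List.pyGetD (PySem.List.pyGetD (scmSolve s n (lo : Int) (m : Int)) (-1) []) 0 0,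
                  PySem.List.pyGetD (PySem.List.pyGetD (scmSolve s n (m : Int) (hi : Int)) 0 []) 1 0]] ++
                PySem.List.slice (scmSolve s n (m : Int) (hi : Int)) (some 1) none
            else scmSolve s n (lo : Int) (m : Int) ++ scmSolve s n (m : Int) (hi : Int) := by
        rw [show scmSolve s (n + 1) (lo : Int) (hi : Int)
              = if (hi : Int) - lo = 1 then [[(lo : Int), (lo : Int)]]
                else
                  let mid := PySem.Int.floordiv ((lo : Int) + hi) 2
                  let L := scmSolve s n (lo : Int) mid
                  let R := scmSolve s n mid (hi : Int)
                  if PySem.List.pyGetD s (mid - 1) 0 ≤ PySem.List.pyGetD s mid 0 then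
                    PySem.List.slice L none (some (-1)) ++
                      [[PySem.List.pyGetD (PySem.List.pyGetD L (-1) []) 0 0,
                        PySem.List.pyGetD (PySem.List.pyGetD R 0 []) 1 0]] ++
                      PySem.List.slice R (some 1) none
                  else L ++ R from rfl,
          if_neg (by omega)]
        simp only [hmid]
      rw [hunfold]
      -- split the window at m
      have hIHL := ih lo m hlom (by omega) (by omega)
      have hIHR := ih m hi hmhi h2 (by omega)
      set u := (s.drop lo).take (m - lo) with hu_def
      set v := (s.drop m).take (hi - m) with hv_def
      have hu_len : u.length = m - lo := by
        rw [hu_def]; simp; omega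
      have hv_len : v.length = hi - m := by
        rw [hv_def]; simp; omega
      have hu : u ≠ [] := List.ne_nil_of_length_pos (by omega)
      have hv : v ≠ [] := List.ne_nil_of_length_pos (by omega)
      have hsplit : (s.drop lo).take (hi - lo) = u ++ v := by
        rw [hu_def, hv_def, show hi - lo = (m - lo) + (hi - m) from by omega, List.take_add,
          List.drop_drop, show lo + (m - lo) = m from by omega]
      have hc1 : u.getD (u.length - 1) 0 = s.getD (m - 1) 0 := by
        rw [hu_def]
        rw [scm_getD_take _ _ _ _ (by rw [← hu_def, hu_len]; omega), scm_getD_drop]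
        congr 1
        rw [← hu_def, hu_len]; omega
      have hc2 : v.getD 0 0 = s.getD m 0 := by
        rw [hv_def, scm_getD_take _ _ _ _ (by omega), scm_getD_drop]
        simp
      have hcond_eq : (PySem.List.pyGetD s ((m : Int) - 1) 0 ≤ PySem.List.pyGetD s (m : Int) 0)
          = (u.getD (u.length - 1) 0 ≤ v.getD 0 0) := by
        rw [show ((m : Int) - 1) = (((m - 1 : Nat)) : Int) from by omega,
          PySem.List.pyGetD_natCast, PySem.List.pyGetD_natCast, hc1, hc2]
      rw [hsplit, scmGo_append (u.length + v.length) u (by omega) hu v hv (lo : Int),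
        show (lo : Int) + (u.length : Int) = (m : Int) from by rw [hu_len]; omega,
        hIHL, hIHR]
      simp only [hcond_eq]
      by_cases hcond : u.getD (u.length - 1) 0 ≤ v.getD 0 0
      · rw [if_pos hcond, if_pos hcond]
        unfold scmFuse
        rw [PySem.List.slice_to_neg_one, PySem.List.slice_from_one,
          scm_pyGetD_neg_one _ (scmGo_ne_nil _ _), scm_pyGetD_zero _ (scmGo_ne_nil _ _),
          PySem.List.pyGetD_ofNat', PySem.List.pyGetD_ofNat']
      · rw [if_neg hcond, if_neg hcond]

theorem scm_alt_eq_scmGo (s : List Int) : scm_alt s = scmGo s 0 := by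
  unfold scm_alt
  by_cases h : s.length = 0
  · have : s = [] := List.length_eq_zero_iff.1 h
    subst this
    simp [scmGo, scmRunLen]
  · rw [if_neg (by simpa using h)]
    have := scmSolve_eq s s.length 0 s.length (by omega) (le_refl _) (by omega)
    simp only [Nat.cast_zero] at this
    rw [this]
    simp

-- ===== VERDICT (by name: the statement is the Claim_ definition above) =====
theorem scm_spec : Claim_equal_scm := by
  intro s _
  unfold Spec_scm
  rw [scm_eq_scmFoldA, scm_alt_eq_scmGo]
  exact scmFoldA_eq_scmGo s.length s (le_refl _) 0
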